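-- pv_equiv track=rewrite | github.com/Deepstroy/NS-SCMMAB | npsem/NIPS2025POMISPLUS_exp/scm_examples.py | group_by_time_index
-- ===== SOURCE A (Python) =====
-- from collections import defaultdict
--
-- def group_by_time_index(G_V):
--     grouped = defaultdict(set)
--     for var in G_V:
--         for i in range(len(var)):
--             if var[i:].isdigit():
--                 idx = int(var[i:])
--                 grouped[idx].add(var)
--                 break
--     return [grouped[i] for i in sorted(grouped.keys())]
-- ===== SOURCE B (Python) =====
-- from collections import defaultdict
--
-- def group_by_time_index(G_V):
--     grouped = defaultdict(set)
--     for var in G_V: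
--         i = len(var)
--         while i > 0 and var[i - 1].isdigit():
--             i -= 1
--         if i < len(var):
--             grouped[int(var[i:])].add(var)
--     return [grouped[i] for i in sorted(grouped.keys())]
-- ===== Notes on version B (the rewrite author's own statement) =====
-- stated objective: faster
-- what changed: Per variable, replaced A's forward loop that tests every suffix var[i:].isdigit() until one is all digits with a single backward while-scan over the trailing digit run; the defaultdict(set) grouping and sorted output are unchanged.
import Mathlib
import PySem

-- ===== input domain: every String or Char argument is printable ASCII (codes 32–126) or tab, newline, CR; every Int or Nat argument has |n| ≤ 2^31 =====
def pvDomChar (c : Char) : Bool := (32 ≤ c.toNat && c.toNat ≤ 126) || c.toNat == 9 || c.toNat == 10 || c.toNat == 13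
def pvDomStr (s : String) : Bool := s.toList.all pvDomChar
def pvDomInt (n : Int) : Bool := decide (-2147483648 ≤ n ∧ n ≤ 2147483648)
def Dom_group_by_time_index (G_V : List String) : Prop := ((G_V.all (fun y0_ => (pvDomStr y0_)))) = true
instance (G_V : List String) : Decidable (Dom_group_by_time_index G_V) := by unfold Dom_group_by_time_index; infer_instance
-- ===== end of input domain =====

-- B replaces A's forward try-every-suffix scan per variable with a single backward scan
-- over the trailing digits; grouping, keys and sorted output are unchanged (objective: simpler).

-- ===== PORT A =====
-- inner loop of A: 'for i in range(len(var)): if var[i:].isdigit(): return int(var[i:]) (break)'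
-- var[i:] with 0 ≤ i is cs.drop i (exact); int(...) parses a nonempty all-digit string, so
-- ofChars? is some there and '.getD 0' is unreachable.
def pvInnerA (cs : List Char) (i : Nat) : Option Int :=
  if i < cs.length then
    if PySem.Chars.strIsdigit (cs.drop i) then
      some ((PySem.Int.ofChars? (cs.drop i)).getD 0)
    else pvInnerA cs (i + 1)
  else none
termination_by cs.length - i

def group_by_time_index (G_V : List String) : List (List String) :=
  let grouped : PySem.Dict Int (PySem.Set String) :=
    G_V.foldl (fun d var =>
      match pvInnerA var.toList 0 with
      | some idx => d.modify idx PySem.Set.empty (fun s => PySem.Set.add s var)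
      | none => d) PySem.Dict.empty
  (PySem.List.sorted grouped.keys (fun k => k) false).map
    (fun k => grouped.getD k PySem.Set.empty)

-- ===== PORT B =====
-- 'i = len(var); while i > 0 and var[i-1].isdigit(): i -= 1' — var[i-1] is in range here,
-- so 'List.getD' with a dummy default is exact.
def pvScanB (cs : List Char) (i : Nat) : Nat :=
  match i with
  | 0 => 0
  | j + 1 => if PySem.Chars.isdigit (cs.getD j ' ') then pvScanB cs j else j + 1

def group_by_time_index_alt (G_V : List String) : List (List String) :=
  let grouped : PySem.Dict Int (PySem.Set String) :=
    G_V.foldl (fun d var =>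
      let cs := var.toList
      let i := pvScanB cs cs.length
      if i < cs.length then
        d.modify ((PySem.Int.ofChars? (cs.drop i)).getD 0) PySem.Set.empty
          (fun s => PySem.Set.add s var)
      else d) PySem.Dict.empty
  (PySem.List.sorted grouped.keys (fun k => k) false).map
    (fun k => grouped.getD k PySem.Set.empty)

-- ===== PRECONDITION & SPEC =====
def Spec_group_by_time_index (G_V : List String) (out : List (List String)) : Prop := out = group_by_time_index_alt G_V
instance (G_V : List String) (out : List (List String)) : Decidable (Spec_group_by_time_index G_V out) := by unfold Spec_group_by_time_index; infer_instance

-- ===== CLAIM (what is proved, stated in full; the proofs are below) =====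
def Claim_equal_group_by_time_index : Prop := ∀ (G_V : List String), Dom_group_by_time_index G_V → Spec_group_by_time_index G_V (group_by_time_index G_V)

-- ===== LEMMAS AND PROOFS =====

-- backward scan never goes below 0 and at most to i
theorem pvScanB_le (cs : List Char) (i : Nat) : pvScanB cs i ≤ i := by
  induction i with
  | zero => simp [pvScanB]
  | succ j ih =>
    simp only [pvScanB]
    split
    · omega
    · omega

-- everything from the scan result up to i is a digit
theorem pvScanB_digits (cs : List Char) (i : Nat) :
    ∀ j, pvScanB cs i ≤ j → j < i → PySem.Chars.isdigit (cs.getD j ' ') = true := by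
  induction i with
  | zero => intro j h1 h2; omega
  | succ j ih =>
    intro m h1 h2
    by_cases hd : PySem.Chars.isdigit (cs.getD j ' ') = true
    · rw [pvScanB, if_pos hd] at h1
      rcases Nat.lt_succ_iff_lt_or_eq.mp h2 with h | h
      · exact ih m h1 h
      · subst h; exact hd
    · rw [pvScanB, if_neg hd] at h1; omega

-- the character just before the scan result (if any) is not a digit
theorem pvScanB_stop (cs : List Char) (i : Nat) :
    pvScanB cs i = 0 ∨ PySem.Chars.isdigit (cs.getD (pvScanB cs i - 1) ' ') = false := by
  induction i with
  | zero => left; simp [pvScanB]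
  | succ j ih =>
    by_cases hd : PySem.Chars.isdigit (cs.getD j ' ') = true
    · rw [pvScanB, if_pos hd]; exact ih
    · rw [pvScanB, if_neg hd]; right; simpa using hd

-- drop i is a nonempty all-digit suffix iff i is at or past the scan point
theorem strIsdigit_drop_iff (cs : List Char) (i : Nat) (hi : i < cs.length) :
    PySem.Chars.strIsdigit (cs.drop i) = true ↔ pvScanB cs cs.length ≤ i := by
  constructor
  · intro h
    by_contra hlt
    rcases pvScanB_stop cs cs.length with h0 | hnd
    · omega
    · set b := pvScanB cs cs.length with hb
      have hble : b ≤ cs.length := pvScanB_le cs cs.length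
      have hbpos : 0 < b := by omega
      have hlt' : b - 1 < cs.length := by omega
      have hmem : cs[b-1]'hlt' ∈ cs.drop i := by
        have he : cs[b-1]'hlt' = (cs.drop i)[b-1-i]'(by simp; omega) := by
          rw [List.getElem_drop]; congr 1; omega
        rw [he]; exact List.getElem_mem _
      simp only [PySem.Chars.strIsdigit, Bool.and_eq_true, List.all_eq_true] at h
      have hdig := h.2 _ hmem
      rw [List.getD_eq_getElem?_getD, List.getElem?_eq_getElem hlt'] at hnd
      simp only [Option.getD_some] at hnd
      rw [hdig] at hnd
      simp at hnd
  · intro h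
    simp only [PySem.Chars.strIsdigit, Bool.and_eq_true, List.all_eq_true,
      Bool.not_eq_eq_eq_not]
    refine ⟨by simp [List.drop_eq_nil_iff]; omega, ?_⟩
    intro c hc
    rw [List.mem_iff_getElem] at hc
    obtain ⟨k, hk, hck⟩ := hc
    have hklen : i + k < cs.length := by simp at hk; omega
    have hce : c = cs.getD (i + k) ' ' := by
      rw [← hck, List.getElem_drop, List.getD_eq_getElem?_getD,
        List.getElem?_eq_getElem hklen]
      simp
    rw [hce]
    exact pvScanB_digits cs cs.length (i + k) (by omega) hklen

-- A's forward scan from index i, expressed through B's backward-scan result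
theorem pvInnerA_eq (cs : List Char) (i : Nat) :
    pvInnerA cs i =
      if max i (pvScanB cs cs.length) < cs.length then
        some ((PySem.Int.ofChars? (cs.drop (max i (pvScanB cs cs.length)))).getD 0)
      else none := by
  by_cases hi : i < cs.length
  · rw [pvInnerA]
    by_cases hd : PySem.Chars.strIsdigit (cs.drop i) = true
    · have hb : pvScanB cs cs.length ≤ i := (strIsdigit_drop_iff cs i hi).mp hd
      rw [if_pos hi, if_pos hd, Nat.max_eq_left hb, if_pos hi]
    · have hb : ¬ pvScanB cs cs.length ≤ i := fun h => hd ((strIsdigit_drop_iff cs i hi).mpr h)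
      rw [if_pos hi, if_neg hd, pvInnerA_eq cs (i + 1)]
      have h1 : max (i + 1) (pvScanB cs cs.length) = pvScanB cs cs.length := by omega
      have h2 : max i (pvScanB cs cs.length) = pvScanB cs cs.length := by omega
      rw [h1, h2]
  · rw [pvInnerA, if_neg hi]
    have hle := pvScanB_le cs cs.length
    have : ¬ max i (pvScanB cs cs.length) < cs.length := by omega
    rw [if_neg this]
termination_by cs.length - i

-- the two per-variable dict updates are the same function
theorem step_eq :
    (fun (d : PySem.Dict Int (PySem.Set String)) (var : String) =>
      match pvInnerA var.toList 0 with
      | some idx => d.modify idx PySem.Set.empty (fun s => PySem.Set.add s var)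
      | none => d)
    = (fun (d : PySem.Dict Int (PySem.Set String)) (var : String) =>
      let cs := var.toList
      let i := pvScanB cs cs.length
      if i < cs.length then
        d.modify ((PySem.Int.ofChars? (cs.drop i)).getD 0) PySem.Set.empty
          (fun s => PySem.Set.add s var)
      else d) := by
  funext d var
  show (match pvInnerA var.toList 0 with
      | some idx => d.modify idx PySem.Set.empty (fun s => PySem.Set.add s var)
      | none => d)
    = if pvScanB var.toList var.toList.length < var.toList.length then
        d.modify ((PySem.Int.ofChars? (var.toList.drop (pvScanB var.toList var.toList.length))).getD 0)
          PySem.Set.empty (fun s => PySem.Set.add s var)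
      else d
  rw [pvInnerA_eq, Nat.max_eq_right (Nat.zero_le _)]
  by_cases hc : pvScanB var.toList var.toList.length < var.toList.length
  · rw [if_pos hc, if_pos hc]
  · rw [if_neg hc, if_neg hc]

-- ===== VERDICT (by name: the statement is the Claim_ definition above) =====
theorem group_by_time_index_spec : Claim_equal_group_by_time_index := by
  intro G_V _
  unfold Spec_group_by_time_index group_by_time_index group_by_time_index_alt
  rw [step_eq]
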